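-- pv_equiv track=rewrite | github.com/rifolio/RUC | Courses Exercises and More/Scientific Computing/Animal_kingdom_Vladyslav.py | neighbour_empty_rest
-- ===== SOURCE A (Python) =====
-- def neighbour_empty_rest(cur,neighbours):
--     # divide neighbours
--     fish_neighbours =[]
--     empty_neighbours =[]
--     plant_neighbours=[]
--     bear_neighbours=[]
--     meteor_neighbours=[]
--     for neighbour in neighbours:
--         if cur[neighbour]['type'] == "fish":
--             fish_neighbours.append(neighbour)
--         elif cur[neighbour]['type'] == "plant":
--             plant_neighbours.append(neighbour)
--         elif cur[neighbour]['type'] == "bear":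
--             bear_neighbours.append(neighbour)
--         elif cur[neighbour]['type'] == "meteorite":
--             meteor_neighbours.append(neighbour)
--         else:
--             empty_neighbours.append(neighbour)
--
--     return fish_neighbours, empty_neighbours, plant_neighbours, bear_neighbours, meteor_neighbours
-- ===== SOURCE B (Python) =====
-- def neighbour_empty_rest(cur, neighbours):
--     def typ(n):
--         return cur[n]['type']
--     known = ('fish', 'plant', 'bear', 'meteorite')
--     return ([n for n in neighbours if typ(n) == 'fish'],
--             [n for n in neighbours if typ(n) not in known],
--             [n for n in neighbours if typ(n) == 'plant'],
--             [n for n in neighbours if typ(n) == 'bear'],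
--             [n for n in neighbours if typ(n) == 'meteorite'])
-- ===== Notes on version B (the rewrite author's own statement) =====
-- stated objective: alternative
-- what changed: Replaces the single accumulating pass with the five-way if/elif chain by five independent list-comprehension filters, one per returned bucket.
import Mathlib
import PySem

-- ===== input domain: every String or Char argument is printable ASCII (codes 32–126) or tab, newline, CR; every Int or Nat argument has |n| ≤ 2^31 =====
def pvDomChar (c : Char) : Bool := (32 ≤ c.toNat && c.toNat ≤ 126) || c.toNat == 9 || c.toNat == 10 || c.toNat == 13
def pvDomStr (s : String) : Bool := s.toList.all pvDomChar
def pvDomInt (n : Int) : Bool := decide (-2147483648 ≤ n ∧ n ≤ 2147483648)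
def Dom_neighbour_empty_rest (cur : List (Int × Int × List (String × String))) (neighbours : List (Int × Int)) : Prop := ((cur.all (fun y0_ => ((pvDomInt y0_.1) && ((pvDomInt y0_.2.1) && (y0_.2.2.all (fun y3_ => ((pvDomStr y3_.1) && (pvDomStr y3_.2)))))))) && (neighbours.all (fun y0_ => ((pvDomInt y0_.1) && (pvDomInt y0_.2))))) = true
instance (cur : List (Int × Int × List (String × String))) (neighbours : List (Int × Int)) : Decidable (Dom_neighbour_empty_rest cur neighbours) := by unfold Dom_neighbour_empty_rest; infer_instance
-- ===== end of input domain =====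

-- B replaces A's single accumulating pass with a five-way if/elif chain by five independent filters (alternative decomposition, same cost).


-- shared transliteration of the Python expression cur[neighbour]['type']:
-- first-match lookup of the (Int,Int) key in the outer dict, then of "type" in the inner dict
def pvLookupCell (cur : List (Int × Int × List (String × String))) (n : Int × Int) : Option (List (String × String)) :=
  match cur with
  | [] => none
  | (a, b, v) :: rest => if a = n.1 ∧ b = n.2 then some v else pvLookupCell rest n

def pvLookupType (d : List (String × String)) : Option String :=
  match d with
  | [] => none
  | (k, v) :: rest => if k = "type" then some v else pvLookupType rest

def pvType? (cur : List (Int × Int × List (String × String))) (n : Int × Int) : Option String :=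
  (pvLookupCell cur n).bind pvLookupType

-- ===== PORT A =====
def neighbour_empty_rest (cur : List (Int × Int × List (String × String))) (neighbours : List (Int × Int)) : (List (Int × Int)) × (List (Int × Int)) × (List (Int × Int)) × (List (Int × Int)) × (List (Int × Int)) :=
  neighbours.foldl (fun st n =>
    let t := (pvType? cur n).getD ""   -- KeyError cases are excluded by Pre_
    if t = "fish" then (st.1 ++ [n], st.2)
    else if t = "plant" then (st.1, st.2.1, st.2.2.1 ++ [n], st.2.2.2)
    else if t = "bear" then (st.1, st.2.1, st.2.2.1, st.2.2.2.1 ++ [n], st.2.2.2.2)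
    else if t = "meteorite" then (st.1, st.2.1, st.2.2.1, st.2.2.2.1, st.2.2.2.2 ++ [n])
    else (st.1, st.2.1 ++ [n], st.2.2))
    ([], [], [], [], [])

-- ===== PORT B =====
def neighbour_empty_rest_alt (cur : List (Int × Int × List (String × String))) (neighbours : List (Int × Int)) : (List (Int × Int)) × (List (Int × Int)) × (List (Int × Int)) × (List (Int × Int)) × (List (Int × Int)) :=
  (neighbours.filter (fun n => decide ((pvType? cur n).getD "" = "fish")),
   neighbours.filter (fun n => decide (¬ (pvType? cur n).getD "" ∈ (["fish", "plant", "bear", "meteorite"] : List String))),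
   neighbours.filter (fun n => decide ((pvType? cur n).getD "" = "plant")),
   neighbours.filter (fun n => decide ((pvType? cur n).getD "" = "bear")),
   neighbours.filter (fun n => decide ((pvType? cur n).getD "" = "meteorite")))

-- ===== PRECONDITION & SPEC =====
-- Pre_ excludes exactly the inputs on which the Python A raises KeyError:
-- a neighbour missing from cur, or a cell dict without a 'type' key.
def Pre_neighbour_empty_rest (cur : List (Int × Int × List (String × String))) (neighbours : List (Int × Int)) : Prop :=
  ∀ n ∈ neighbours, ∃ c ∈ cur, c.1 = n.1 ∧ c.2.1 = n.2 ∧ ∃ kv ∈ c.2.2, kv.1 = "type"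
instance (cur : List (Int × Int × List (String × String))) (neighbours : List (Int × Int)) : Decidable (Pre_neighbour_empty_rest cur neighbours) := by unfold Pre_neighbour_empty_rest; infer_instance
def pvWitness_neighbour_empty_rest : (List (Int × Int × List (String × String))) × (List (Int × Int)) :=
  ([(0, 0, [("type", "fish")]), (0, 1, [("type", "lava")])], [(0, 0), (0, 1)])

def Spec_neighbour_empty_rest (cur : List (Int × Int × List (String × String))) (neighbours : List (Int × Int)) (out : (List (Int × Int)) × (List (Int × Int)) × (List (Int × Int)) × (List (Int × Int)) × (List (Int × Int))) : Prop := out = neighbour_empty_rest_alt cur neighbours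
instance (cur : List (Int × Int × List (String × String))) (neighbours : List (Int × Int)) (out : (List (Int × Int)) × (List (Int × Int)) × (List (Int × Int)) × (List (Int × Int)) × (List (Int × Int))) : Decidable (Spec_neighbour_empty_rest cur neighbours out) := by unfold Spec_neighbour_empty_rest; infer_instance

-- ===== CLAIM (what is proved, stated in full; the proofs are below) =====
def Claim_equal_neighbour_empty_rest : Prop := ∀ (cur : List (Int × Int × List (String × String))) (neighbours : List (Int × Int)), Dom_neighbour_empty_rest cur neighbours → Pre_neighbour_empty_rest cur neighbours → Spec_neighbour_empty_rest cur neighbours (neighbour_empty_rest cur neighbours)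

-- ===== LEMMAS AND PROOFS =====
theorem neighbour_fold_inv (cur : List (Int × Int × List (String × String))) (ns : List (Int × Int))
    (f e p b m : List (Int × Int)) :
    ns.foldl (fun st n =>
      let t := (pvType? cur n).getD ""
      if t = "fish" then (st.1 ++ [n], st.2)
      else if t = "plant" then (st.1, st.2.1, st.2.2.1 ++ [n], st.2.2.2)
      else if t = "bear" then (st.1, st.2.1, st.2.2.1, st.2.2.2.1 ++ [n], st.2.2.2.2)
      else if t = "meteorite" then (st.1, st.2.1, st.2.2.1, st.2.2.2.1, st.2.2.2.2 ++ [n])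
      else (st.1, st.2.1 ++ [n], st.2.2)) (f, e, p, b, m)
    = (f ++ ns.filter (fun n => decide ((pvType? cur n).getD "" = "fish")),
       e ++ ns.filter (fun n => decide (¬ (pvType? cur n).getD "" ∈ (["fish", "plant", "bear", "meteorite"] : List String))),
       p ++ ns.filter (fun n => decide ((pvType? cur n).getD "" = "plant")),
       b ++ ns.filter (fun n => decide ((pvType? cur n).getD "" = "bear")),
       m ++ ns.filter (fun n => decide ((pvType? cur n).getD "" = "meteorite"))) := by
  induction ns generalizing f e p b m with
  | nil => simp
  | cons x xs ih =>
    simp only [List.foldl_cons, List.filter_cons]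
    by_cases h1 : (pvType? cur x).getD "" = "fish"
    · simp [h1, ih]
    · by_cases h2 : (pvType? cur x).getD "" = "plant"
      · simp [h2, ih]
      · by_cases h3 : (pvType? cur x).getD "" = "bear"
        · simp [h3, ih]
        · by_cases h4 : (pvType? cur x).getD "" = "meteorite"
          · simp [h4, ih]
          · simp [h1, h2, h3, h4, ih]

-- ===== VERDICT (by name: the statement is the Claim_ definition above) =====
theorem neighbour_empty_rest_spec : Claim_equal_neighbour_empty_rest := by
  intro cur neighbours _ _
  unfold Spec_neighbour_empty_rest neighbour_empty_rest neighbour_empty_rest_alt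
  simpa using neighbour_fold_inv cur neighbours [] [] [] [] []
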